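-- pv_equiv track=rewrite | github.com/broadinstitute/virnucpro-broad | units.py | get_batch_indices
-- ===== SOURCE A (Python) =====
-- def get_batch_indices(sequence_lengths, toks_per_batch=2048):
--     """
--     Groups sequences into batches where total tokens (including BOS/EOS) does not exceed toks_per_batch.
--
--     Args:
--         sequence_lengths: list of sequence lengths
--         toks_per_batch: maximum tokens per batch
--
--     Returns:
--         list of lists of indices (each inner list is one batch)
--     """
--     # Create list of (index, length) tuples and sort by length descending
--     indexed_lengths = list(enumerate(sequence_lengths))
--     indexed_lengths.sort(key=lambda x: x[1], reverse=True)
--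
--     batches = []
--     current_batch = []
--     current_tokens = 0
--
--     for idx, seq_len in indexed_lengths:
--         # Each sequence needs seq_len + 2 tokens (for BOS and EOS)
--         tokens_needed = seq_len + 2
--
--         # If single sequence exceeds limit, it gets its own batch
--         if tokens_needed > toks_per_batch:
--             if current_batch:
--                 batches.append(current_batch)
--                 current_batch = []
--                 current_tokens = 0
--             batches.append([idx])
--             continue
--
--         # Check if adding this sequence would exceed the batch limit
--         if current_tokens + tokens_needed > toks_per_batch:
--             # Start new batch
--             batches.append(current_batch)
--             current_batch = [idx]
--             current_tokens = tokens_needed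
--         else:
--             # Add to current batch
--             current_batch.append(idx)
--             current_tokens += tokens_needed
--
--     # Add final batch if not empty
--     if current_batch:
--         batches.append(current_batch)
--
--     return batches
-- ===== SOURCE B (Python) =====
-- def get_batch_indices(sequence_lengths, toks_per_batch=2048):
--     items = sorted(enumerate(sequence_lengths), key=lambda x: x[1], reverse=True)
--     n = len(items)
--     batches = []
--     pos = 0
--     while pos < n:
--         if items[pos][1] + 2 > toks_per_batch:
--             batches.append([items[pos][0]])
--             pos += 1
--             continue
--         # peel the maximal prefix of remaining items whose total fits
--         total = 0
--         end = pos
--         while end < n and total + items[end][1] + 2 <= toks_per_batch: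
--             total += items[end][1] + 2
--             end += 1
--         batches.append([idx for idx, _ in items[pos:end]])
--         pos = end
--     return batches
-- ===== Notes on version B (the rewrite author's own statement) =====
-- stated objective: alternative
-- what changed: Instead of A's single fold that threads a current-batch/current-token accumulator with flush logic across iterations, B repeatedly peels one whole batch per outer step: a singleton for an oversized head, otherwise the maximal fitting prefix found by an inner take-while scan, sliced off and emitted; no batch state crosses outer iterations.
import Mathlib
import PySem

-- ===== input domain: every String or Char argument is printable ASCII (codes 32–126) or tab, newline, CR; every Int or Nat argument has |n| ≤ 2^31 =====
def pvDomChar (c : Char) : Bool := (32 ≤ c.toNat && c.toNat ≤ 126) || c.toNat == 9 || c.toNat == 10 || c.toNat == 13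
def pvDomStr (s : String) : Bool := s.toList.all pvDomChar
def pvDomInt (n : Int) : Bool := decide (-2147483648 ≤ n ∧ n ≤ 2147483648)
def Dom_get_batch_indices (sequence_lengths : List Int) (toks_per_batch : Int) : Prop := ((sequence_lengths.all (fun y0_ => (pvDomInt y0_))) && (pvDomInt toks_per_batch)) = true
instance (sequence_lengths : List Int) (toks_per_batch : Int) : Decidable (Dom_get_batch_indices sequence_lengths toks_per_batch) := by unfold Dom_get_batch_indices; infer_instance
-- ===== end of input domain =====

-- B peels maximal fitting prefixes from the sorted list (inner take-while + slice) instead of carrying a current-batch accumulator through one loop; equal return value proved (objective: alternative).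


-- ===== PORT A =====
-- loop body of A's for-loop, state = (batches, current_batch, current_tokens)
def pvStepA (T : Int) (st : List (List Int) × List Int × Int) (p : Int × Int) :
    List (List Int) × List Int × Int :=
  let t := p.2 + 2
  if T < t then
    ((if st.2.1 ≠ [] then st.1 ++ [st.2.1] else st.1) ++ [[p.1]], [], 0)
  else if T < st.2.2 + t then
    (st.1 ++ [st.2.1], [p.1], t)
  else
    (st.1, st.2.1 ++ [p.1], st.2.2 + t)

def get_batch_indices (sequence_lengths : List Int) (toks_per_batch : Int) : List (List Int) :=
  let indexed_lengths :=
    PySem.List.sorted (PySem.List.enumerate sequence_lengths) (fun x => x.2) true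
  let st := indexed_lengths.foldl (pvStepA toks_per_batch) ([], [], 0)
  if st.2.1 ≠ [] then st.1 ++ [st.2.1] else st.1

-- ===== PORT B =====
-- B's inner while loop: take the maximal prefix of items fitting on top of acc, return (their indices, the rest)
def pvTake (T : Int) (acc : Int) : List (Int × Int) → List Int × List (Int × Int)
  | [] => ([], [])
  | p :: rest =>
    if acc + p.2 + 2 ≤ T then
      let r := pvTake T (acc + p.2 + 2) rest
      (p.1 :: r.1, r.2)
    else ([], p :: rest)

-- termination helper for pvPeel: the rest returned by pvTake is no longer than the input
theorem pvTake_rest_length (T : Int) (l : List (Int × Int)) :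
    ∀ acc, (pvTake T acc l).2.length ≤ l.length := by
  induction l with
  | nil => intro acc; simp [pvTake]
  | cons p rest ih =>
    intro acc
    simp only [pvTake]
    split
    · exact le_trans (ih _) (Nat.le_succ _)
    · simp

-- B's outer while loop: peel one batch per iteration
def pvPeel (T : Int) (l : List (Int × Int)) : List (List Int) :=
  match l with
  | [] => []
  | p :: rest =>
    if _h : T < p.2 + 2 then [p.1] :: pvPeel T rest
    else
      let r := pvTake T 0 (p :: rest)
      r.1 :: pvPeel T r.2
termination_by l.length
decreasing_by
  · simp
  · simp only [pvTake, if_pos (by omega : (0 : Int) + p.2 + 2 ≤ T)]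
    exact Nat.lt_succ_of_le (pvTake_rest_length T rest _)

def get_batch_indices_alt (sequence_lengths : List Int) (toks_per_batch : Int) : List (List Int) :=
  pvPeel toks_per_batch
    (PySem.List.sorted (PySem.List.enumerate sequence_lengths) (fun x => x.2) true)

-- ===== PRECONDITION & SPEC =====
def Spec_get_batch_indices (sequence_lengths : List Int) (toks_per_batch : Int) (out : List (List Int)) : Prop := out = get_batch_indices_alt sequence_lengths toks_per_batch
instance (sequence_lengths : List Int) (toks_per_batch : Int) (out : List (List Int)) : Decidable (Spec_get_batch_indices sequence_lengths toks_per_batch out) := by unfold Spec_get_batch_indices; infer_instance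

-- ===== CLAIM =====
def Claim_equal_get_batch_indices : Prop := ∀ (sequence_lengths : List Int) (toks_per_batch : Int), Dom_get_batch_indices sequence_lengths toks_per_batch → Spec_get_batch_indices sequence_lengths toks_per_batch (get_batch_indices sequence_lengths toks_per_batch)

-- ===== LEMMAS AND PROOFS =====

-- A's whole loop re-expressed recursively: state (cur, tok), batches prepended outside
def pvPeelFrom (T : Int) (cur : List Int) (tok : Int) : List (Int × Int) → List (List Int)
  | [] => if cur ≠ [] then [cur] else []
  | p :: rest =>
    if T < p.2 + 2 then
      (if cur ≠ [] then [cur] else []) ++ [p.1] :: pvPeelFrom T [] 0 rest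
    else if T < tok + p.2 + 2 then
      cur :: pvPeelFrom T [p.1] (p.2 + 2) rest
    else
      pvPeelFrom T (cur ++ [p.1]) (tok + p.2 + 2) rest

-- A's fold + final flush equals pvPeelFrom
theorem pv_fold_peelFrom (T : Int) (l : List (Int × Int)) :
    ∀ (B : List (List Int)) (cur : List Int) (tok : Int),
      (let st := l.foldl (pvStepA T) (B, cur, tok);
        if st.2.1 ≠ [] then st.1 ++ [st.2.1] else st.1)
      = B ++ pvPeelFrom T cur tok l := by
  induction l with
  | nil =>
    intro B cur tok
    simp only [List.foldl_nil, pvPeelFrom]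
    split <;> simp_all
  | cons p rest ih =>
    intro B cur tok
    simp only [List.foldl_cons]
    by_cases h1 : T < p.2 + 2
    · have hst : pvStepA T (B, cur, tok) p
          = ((if cur ≠ [] then B ++ [cur] else B) ++ [[p.1]], [], 0) := by
        simp [pvStepA, h1]
      rw [hst, ih]
      simp only [pvPeelFrom, h1, if_true]
      split_ifs <;> simp [List.append_assoc]
    · by_cases h2 : T < tok + (p.2 + 2)
      · have hst : pvStepA T (B, cur, tok) p = (B ++ [cur], [p.1], p.2 + 2) := by
          simp [pvStepA, h1, h2]
        rw [hst, ih]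
        have h2' : T < tok + p.2 + 2 := by omega
        simp [pvPeelFrom, h1, h2', List.append_assoc]
      · have hst : pvStepA T (B, cur, tok) p = (B, cur ++ [p.1], tok + (p.2 + 2)) := by
          simp [pvStepA, h1, h2]
        rw [hst, ih]
        have h2' : ¬ T < tok + p.2 + 2 := by omega
        have ha : tok + (p.2 + 2) = tok + p.2 + 2 := by ring
        simp [pvPeelFrom, h1, h2', ha]

-- mid-batch (cur ≠ []) on an all-normal list: pvPeelFrom finishes the batch via pvTake
theorem pv_peelFrom_take (T : Int) (l : List (Int × Int))
    (hN : ∀ p ∈ l, p.2 + 2 ≤ T) :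
    ∀ (cur : List Int) (tok : Int), cur ≠ [] →
      pvPeelFrom T cur tok l
        = (cur ++ (pvTake T tok l).1) :: pvPeel T (pvTake T tok l).2 := by
  induction l with
  | nil =>
    intro cur tok hc
    simp [pvPeelFrom, pvTake, pvPeel, hc]
  | cons p rest ih =>
    intro cur tok hc
    have hp := hN p (List.mem_cons_self ..)
    have hrest : ∀ q ∈ rest, q.2 + 2 ≤ T := fun q hq => hN q (List.mem_cons_of_mem _ hq)
    have hno : ¬ T < p.2 + 2 := by omega
    by_cases h2 : T < tok + p.2 + 2
    · have htk : ¬ (tok + p.2 + 2 ≤ T) := by omega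
      rw [pvPeelFrom]
      simp only [hno, if_false, h2, if_true]
      rw [ih hrest [p.1] (p.2 + 2) (by simp)]
      simp only [pvTake, htk, if_false]
      rw [pvPeel]
      simp only [hno]
      simp only [pvTake, zero_add]
      simp [hp]
    · have htk : tok + p.2 + 2 ≤ T := by omega
      rw [pvPeelFrom]
      simp only [hno, if_false, h2, if_false]
      rw [ih hrest (cur ++ [p.1]) (tok + p.2 + 2) (by simp)]
      simp only [pvTake, htk, if_pos]
      simp [List.append_assoc]

-- fresh-state pvPeelFrom equals pvPeel on a descending-by-snd list
theorem pv_peelFrom_peel (T : Int) (l : List (Int × Int))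
    (hpair : l.Pairwise (fun a b => b.2 ≤ a.2)) :
    pvPeelFrom T [] 0 l = pvPeel T l := by
  induction l with
  | nil => simp [pvPeelFrom, pvPeel]
  | cons p rest ih =>
    rcases List.pairwise_cons.mp hpair with ⟨h1, h2⟩
    by_cases hp : T < p.2 + 2
    · rw [pvPeelFrom, pvPeel]
      simp only [hp, if_true, dif_pos]
      simp [ih h2]
    · have hN : ∀ q ∈ rest, q.2 + 2 ≤ T := fun q hq => by have := h1 q hq; omega
      rw [pvPeelFrom]
      have h0 : ¬ T < 0 + p.2 + 2 := by omega
      simp only [hp, if_false, h0]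
      rw [pv_peelFrom_take T rest hN ([] ++ [p.1]) (0 + p.2 + 2) (by simp)]
      rw [pvPeel]
      simp only [hp]
      simp only [pvTake, if_pos (by omega : (0 : Int) + p.2 + 2 ≤ T)]
      simp

-- ===== VERDICT =====
theorem get_batch_indices_spec : Claim_equal_get_batch_indices := by
  intro sequence_lengths T _
  unfold Spec_get_batch_indices get_batch_indices get_batch_indices_alt
  have hpair :
      (PySem.List.sorted (PySem.List.enumerate sequence_lengths) (fun x => x.2) true).Pairwise
        (fun a b => b.2 ≤ a.2) :=
    PySem.List.sorted_pairwise_rev (xs := PySem.List.enumerate sequence_lengths)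
      (key := fun x => x.2)
  rw [pv_fold_peelFrom, pv_peelFrom_peel T _ hpair]
  simp
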